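-- pv_equiv track=rewrite | github.com/khangdzox/Inference-Engine | cnf_helper.py | get_main_operator
-- ===== SOURCE A (Python) =====
-- def get_following_operand(sentence: list[str], index: int) -> tuple[int, int]:
--     """
--     Get the index of the operand following the operator at the given index.
--
--     Args:
--         sentence (`list[str]`): The sentence to check.
--         index (`int`): The index of the operator.
--
--     Raises:
--         `ValueError`: If the sentence is invalid.
--
--     Returns:
--         `tuple[int, int]`: The begin and end index of the operand following the operator.
--     """
--     # check if the operand starts with a '~'
--     # if it does, get the operand after the '~'
--     if sentence[index + 1] == '~':
--         _, end_after_not = get_following_operand(sentence, index + 1)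
--         return index + 1, end_after_not
--
--     # if the operand not start with a '(', then the operand is a single character
--     if sentence[index + 1] != '(':
--         return index + 1, index + 1
--
--     parenthesis_stack = []
--     # iterate forwards from the operator
--     for i in range(index + 1, len(sentence)):
--
--         # push and pop the parenthesis stack
--         if sentence[i] == '(':
--             parenthesis_stack.append(i)
--         elif sentence[i] == ')':
--             if len(parenthesis_stack) > 0:
--                 parenthesis_stack.pop()
--
--         # if the parenthesis stack is empty, then the whole operand has been found
--         if len(parenthesis_stack) == 0:
--             end = i
--             return index + 1, end
--
--     # if the parenthesis stack is not empty, then the sentence is invalid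
--     raise ValueError("Invalid sentence: " + " ".join(sentence))
--
-- def get_main_operator(sentence: list[str]) -> str | None:
--     """
--     Get the main operator that connects the operands in the sentence.
--
--     Return `""` if the sentence is a single operand (no operator).\\
--     Return `None` if the sentence has more than one operator connecting the operands (more than one operator).\\
--     Return the operator if the sentence has only one operator connecting the operands (exactly one operator).
--
--     Args:
--         sentence (`list[str]`): The sentence to check.
--
--     Returns:
--         `str | None`: The main operator that connects the operands in the sentence.
--     """
--     operator = ""
--
--     idx = -1
--     # iterate through the sentence
--     while idx < len(sentence):
--         # get to the next operator after the current index
--         _, end = get_following_operand(sentence, idx)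
--         idx = end + 1
--
--         # if the index is out of bounds, then the sentence has no more operators
--         if idx >= len(sentence):
--             break
--
--         # if the operator is not set, then set the operator
--         if operator == "":
--             operator = sentence[idx]
--
--         # if the operator is already set, then check if the operator is the same as the previous operator
--         # if the operator is different, then the sentence has more than one operator. return None
--         elif sentence[idx] != operator:
--             return None
--
--     # return the operator
--     return operator
-- ===== SOURCE B (Python) =====
-- def get_main_operator(sentence: list[str]) -> str | None:
--     """Single linear pass over the tokens with a paren-depth counter:
--     alternately consume one operand and one operator token, no recursion, no helper."""
--     operator = ""
--     i, n = 0, len(sentence)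
--     while True:
--         # consume one operand: leading '~'s, then a parenthesised group or a single token
--         while sentence[i] == '~':
--             i += 1
--         if sentence[i] == '(':
--             depth = 0
--             while True:
--                 if i >= n:
--                     raise ValueError("Invalid sentence: " + " ".join(sentence))
--                 if sentence[i] == '(':
--                     depth += 1
--                 elif sentence[i] == ')':
--                     depth -= 1
--                 i += 1
--                 if depth == 0:
--                     break
--         else:
--             i += 1
--         # the token after an operand, if any, is an operator
--         if i >= n:
--             return operator
--         if operator == "":
--             operator = sentence[i]
--         elif sentence[i] != operator:
--             return None
--         i += 1
-- ===== Notes on version B (the rewrite author's own statement) =====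
-- stated objective: simpler
-- what changed: A parses each operand with a recursive helper that returns (begin,end) index pairs and tracks parentheses with an explicit index stack, driven by an outer while loop that re-seeds from index -1; B is one flat linear pass with an integer paren-depth counter and no helper, no recursion and no stack, consuming operand and operator tokens alternately.
import Mathlib
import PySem

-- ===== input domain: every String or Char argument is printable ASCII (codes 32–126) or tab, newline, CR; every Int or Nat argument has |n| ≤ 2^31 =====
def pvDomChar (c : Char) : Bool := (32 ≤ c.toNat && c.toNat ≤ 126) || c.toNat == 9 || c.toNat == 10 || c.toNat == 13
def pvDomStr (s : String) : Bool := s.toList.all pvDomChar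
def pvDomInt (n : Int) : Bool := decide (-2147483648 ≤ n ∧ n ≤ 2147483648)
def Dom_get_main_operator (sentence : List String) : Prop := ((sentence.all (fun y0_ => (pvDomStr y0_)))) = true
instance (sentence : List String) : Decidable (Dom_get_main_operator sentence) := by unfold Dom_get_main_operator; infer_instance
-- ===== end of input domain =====

-- B replaces A's recursive operand helper (index pairs + an explicit parenthesis stack)
-- by one linear pass with an integer depth counter; objective: simpler.

-- ===== PORT A =====
-- A's `for i in range(index+1, len(sentence))` parenthesis scan; `none` = the ValueError
-- A raises after the loop (excluded by Pre_).
def gfoScan (s : List String) : Nat → Int → List Int → Option Int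
  | 0, _, _ => none
  | f+1, i, stack =>
    if i < (s.length : Int) then
      match PySem.List.pyGet? s i with
      | none => none
      | some t =>
        let stack' :=
          if t == "(" then i :: stack
          else if t == ")" then (if stack.length > 0 then stack.tail else stack)
          else stack
        if stack'.length == 0 then some i
        else gfoScan s f (i+1) stack'
    else none

-- get_following_operand; `none` = IndexError/ValueError (all excluded by Pre_); fuel only for totality.
def gfoFuel (s : List String) : Nat → Int → Option (Int × Int)
  | 0, _ => none
  | f+1, index =>
    match PySem.List.pyGet? s (index + 1) with
    | none => none
    | some t =>
      if t == "~" then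
        match gfoFuel s f (index + 1) with
        | none => none
        | some (_, e) => some (index + 1, e)
      else if t != "(" then some (index + 1, index + 1)
      else
        match gfoScan s (s.length + 1) (index + 1) [] with
        | none => none
        | some e => some (index + 1, e)

-- the `while idx < len(sentence)` loop of get_main_operator; `none` is both an escaped
-- exception (excluded by Pre_) and Python's `return None`.
def mainLoopA (s : List String) : Nat → String → Int → Option String
  | 0, _, _ => none
  | f+1, operator, idx =>
    if idx < (s.length : Int) then
      match gfoFuel s (s.length + 1) idx with
      | none => none
      | some (_, e) =>
        let idx' := e + 1
        if (s.length : Int) ≤ idx' then some operator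
        else
          match PySem.List.pyGet? s idx' with
          | none => none
          | some t =>
            if operator == "" then mainLoopA s f t idx'
            else if t != operator then none
            else mainLoopA s f operator idx'
    else some operator

def get_main_operator (sentence : List String) : Option String :=
  mainLoopA sentence (sentence.length + 2) "" (-1)

-- ===== PORT B =====
-- B's inner `while sentence[i] == '~'` loop; `none` = IndexError (excluded by Pre_).
def altSkipNeg (s : List String) : Nat → Int → Option Int
  | 0, _ => none
  | f+1, i =>
    match PySem.List.pyGet? s i with
    | none => none
    | some t => if t == "~" then altSkipNeg s f (i+1) else some i

-- B's depth-counter loop over a parenthesised group; `none` = the ValueError.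
def altParen (s : List String) : Nat → Int → Int → Option Int
  | 0, _, _ => none
  | f+1, i, depth =>
    if (s.length : Int) ≤ i then none
    else
      match PySem.List.pyGet? s i with
      | none => none
      | some t =>
        let depth' := if t == "(" then depth + 1 else if t == ")" then depth - 1 else depth
        if depth' == 0 then some (i+1) else altParen s f (i+1) depth'

-- B's outer `while True` loop; fuel only for totality.
def altLoop (s : List String) : Nat → String → Int → Option String
  | 0, _, _ => none
  | f+1, operator, i =>
    match altSkipNeg s (s.length + 1) i with
    | none => none
    | some i1 =>
      match PySem.List.pyGet? s i1 with
      | none => none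
      | some t =>
        match (if t == "(" then altParen s (s.length + 1) i1 0 else some (i1 + 1)) with
        | none => none
        | some i2 =>
          if (s.length : Int) ≤ i2 then some operator
          else
            match PySem.List.pyGet? s i2 with
            | none => none
            | some op =>
              if operator == "" then altLoop s f op (i2 + 1)
              else if op != operator then none
              else altLoop s f operator (i2 + 1)

def get_main_operator_alt (sentence : List String) : Option String :=
  altLoop sentence (sentence.length + 2) "" 0

-- ===== PRECONDITION & SPEC =====
-- the CNF token grammar: consume a minimal balanced parenthesised group (depth d ≥ 1 open)
def pvGroup (d : Nat) : List String → Option (List String)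
  | [] => none
  | t :: rest =>
    let d' := if t = "(" then d + 1 else if t = ")" then d - 1 else d
    if d' = 0 then some rest else pvGroup d' rest

-- one operand: '~'* then a parenthesised group or a single token
def pvOperandPre : List String → Option (List String)
  | [] => none
  | t :: rest =>
    if t = "~" then pvOperandPre rest
    else if t = "(" then pvGroup 1 rest
    else some rest

-- alternate operand/operator per the grammar, remembering the first operator `op`;
-- true exactly when A's scan terminates with a return: either the sentence is consumed,
-- or a second distinct operator is met (A returns None there, before reading the tail).
-- (fuel only makes the check computable)
def pvRetAux : Nat → String → List String → Bool
  | 0, _, _ => false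
  | f+1, op, l =>
    match pvOperandPre l with
    | none => false
    | some [] => true
    | some (t :: r) =>
      if op = "" then pvRetAux f t r
      else if t ≠ op then true
      else pvRetAux f op r

def pvRet (op : String) (l : List String) : Bool := pvRetAux (l.length + 1) op l

-- Pre_: exactly the inputs on which A returns a value (well-formed alternation, or an
-- early second distinct operator). Outside it A raises IndexError or ValueError.
def Pre_get_main_operator (sentence : List String) : Prop := pvRet "" sentence = true
instance (sentence : List String) : Decidable (Pre_get_main_operator sentence) := by
  unfold Pre_get_main_operator; infer_instance

def pvWitness_get_main_operator : List String := ["a", "&", "(", "b", "|", "c", ")"]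

def Spec_get_main_operator (sentence : List String) (out : Option String) : Prop := out = get_main_operator_alt sentence
instance (sentence : List String) (out : Option String) : Decidable (Spec_get_main_operator sentence out) := by unfold Spec_get_main_operator; infer_instance

-- ===== CLAIM (what is proved, stated in full; the proofs are below) =====
def Claim_equal_get_main_operator : Prop := ∀ (sentence : List String), Dom_get_main_operator sentence → Pre_get_main_operator sentence → Spec_get_main_operator sentence (get_main_operator sentence)

-- ===== LEMMAS AND PROOFS =====

-- the common reference: walk the grammar carrying A's/B's operator state
def refGoAux : Nat → List String → String → Option String
  | 0, _, _ => none
  | f+1, l, op =>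
    match pvOperandPre l with
    | none => none
    | some [] => some op
    | some (t :: r) =>
      if op = "" then refGoAux f r t
      else if t ≠ op then none
      else refGoAux f r op

def refGo (l : List String) (op : String) : Option String := refGoAux (l.length + 1) l op

theorem pvGroup_suffix {d : Nat} {l r : List String} (h : pvGroup d l = some r) :
    r.length < l.length ∧ l.drop (l.length - r.length) = r := by
  induction l generalizing d with
  | nil => simp [pvGroup] at h
  | cons t rest ih =>
    simp only [pvGroup] at h
    generalize hd : (if t = "(" then d + 1 else if t = ")" then d - 1 else d) = d' at h
    split at h
    · cases h
      constructor
      · simp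
      · simp
    · obtain ⟨h1, h2⟩ := ih h
      refine ⟨by simp; omega, ?_⟩
      have : (t :: rest).length - r.length = (rest.length - r.length) + 1 := by simp; omega
      rw [this, List.drop_succ_cons, h2]

theorem pvOperandPre_suffix {l r : List String} (h : pvOperandPre l = some r) :
    r.length < l.length ∧ l.drop (l.length - r.length) = r := by
  induction l with
  | nil => simp [pvOperandPre] at h
  | cons t rest ih =>
    simp only [pvOperandPre] at h
    split at h
    · obtain ⟨h1, h2⟩ := ih h
      refine ⟨by simp; omega, ?_⟩
      have : (t :: rest).length - r.length = (rest.length - r.length) + 1 := by simp; omega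
      rw [this, List.drop_succ_cons, h2]
    · split at h
      · obtain ⟨h1, h2⟩ := pvGroup_suffix h
        refine ⟨by simp; omega, ?_⟩
        have : (t :: rest).length - r.length = (rest.length - r.length) + 1 := by simp; omega
        rw [this, List.drop_succ_cons, h2]
      · cases h
        exact ⟨by simp, by simp⟩

theorem pvRetAux_mono : ∀ (f : Nat) {g : Nat} (op : String) (l : List String),
    l.length < f → l.length < g → pvRetAux f op l = pvRetAux g op l := by
  intro f
  induction f with
  | zero => intro g op l h; omega
  | succ f ih =>
    intro g op l hf hg
    cases g with
    | zero => omega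
    | succ g =>
      simp only [pvRetAux]
      cases hop : pvOperandPre l with
      | none => rfl
      | some r =>
        cases r with
        | nil => rfl
        | cons t rest =>
          have hlen := (pvOperandPre_suffix hop).1
          simp at hlen
          by_cases hop0 : op = ""
          · simp only [hop0, if_true]
            exact ih t rest (by omega) (by omega)
          · simp only [hop0, if_false]
            by_cases ht : t = op
            · simp [ht, ih op rest (by omega : rest.length < f) (by omega : rest.length < g)]
            · simp [ht]

theorem pvRet_unfold (op : String) (l : List String) :
    pvRet op l = match pvOperandPre l with
      | none => false
      | some [] => true
      | some (t :: rest) =>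
        if op = "" then pvRet t rest
        else if t ≠ op then true
        else pvRet op rest := by
  unfold pvRet
  simp only [pvRetAux]
  cases hop : pvOperandPre l with
  | none => rfl
  | some r =>
    cases r with
    | nil => rfl
    | cons t rest =>
      have hlen := (pvOperandPre_suffix hop).1
      simp at hlen
      by_cases hop0 : op = ""
      · simp only [hop0, if_true]
        exact pvRetAux_mono l.length (g := rest.length + 1) t rest (by omega) (by omega)
      · simp only [hop0, if_false]
        by_cases ht : t = op
        · rw [if_neg (by simp [ht]), if_neg (by simp [ht])]
          rw [pvRetAux_mono l.length (g := rest.length + 1) op rest (by omega) (by omega)]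
          simp only [pvRetAux]
          simp [hop0]
        · simp [ht]

theorem refGoAux_mono : ∀ (f : Nat) {g : Nat} (l : List String) (op : String),
    l.length < f → l.length < g → refGoAux f l op = refGoAux g l op := by
  intro f
  induction f with
  | zero => intro g l op h; omega
  | succ f ih =>
    intro g l op hf hg
    cases g with
    | zero => omega
    | succ g =>
      simp only [refGoAux]
      cases hop : pvOperandPre l with
      | none => rfl
      | some r =>
        cases r with
        | nil => rfl
        | cons t rest =>
          have hlen := (pvOperandPre_suffix hop).1
          simp at hlen
          by_cases hop' : op = ""
          · simp only [hop', if_true]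
            exact ih rest t (by omega) (by omega)
          · simp only [hop', if_false]
            by_cases ht : t = op
            · simp [ht, ih rest op (by omega : rest.length < f) (by omega : rest.length < g)]
            · simp [ht]

theorem refGo_unfold (l : List String) (op : String) :
    refGo l op = match pvOperandPre l with
      | none => none
      | some [] => some op
      | some (t :: r) =>
        if op = "" then refGo r t
        else if t ≠ op then none
        else refGo r op := by
  unfold refGo
  simp only [refGoAux]
  cases hop : pvOperandPre l with
  | none => rfl
  | some r =>
    cases r with
    | nil => rfl
    | cons t rest =>
      have hlen := (pvOperandPre_suffix hop).1
      simp at hlen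
      by_cases hop' : op = ""
      · simp only [hop', if_true]
        exact refGoAux_mono l.length (g := rest.length + 1) rest t (by omega) (by omega)
      · simp only [hop', if_false]
        by_cases ht : t = op
        · rw [if_neg (by simp [ht]), if_neg (by simp [ht])]
          rw [refGoAux_mono l.length (g := rest.length + 1) rest op (by omega) (by omega)]
          simp only [refGoAux]
          simp [hop']
        · simp [ht]

-- ===== A-side bridge =====
theorem gfoScan_some (s : List String) : ∀ (f : Nat) (j : Nat) (stack : List Int)
    (rest : List String), s.length - j < f →
    pvGroup stack.length (s.drop j) = some rest →
    gfoScan s f (j : Int) stack = some ((s.length - rest.length - 1 : Nat) : Int) := by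
  intro f
  induction f with
  | zero => intro j stack rest hf h; exact absurd hf (by omega)
  | succ f ih =>
    intro j stack rest hf h
    have hj : j < s.length := by
      by_contra hlt
      rw [List.drop_of_length_le (by omega)] at h
      simp [pvGroup] at h
    have hdrop : s.drop j = s[j] :: s.drop (j+1) := List.drop_eq_getElem_cons hj
    rw [hdrop] at h
    simp only [pvGroup] at h
    simp only [gfoScan, if_pos (by exact_mod_cast hj : (j : Int) < (s.length : Int)),
      PySem.List.pyGet?_natCast, List.getElem?_eq_getElem hj]
    have hstack : (if s[j] == "(" then (j : Int) :: stack
        else if s[j] == ")" then (if stack.length > 0 then stack.tail else stack)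
        else stack).length
        = (if s[j] = "(" then stack.length + 1 else if s[j] = ")" then stack.length - 1
           else stack.length) := by
      simp only [beq_iff_eq]
      split_ifs with h1 h2 h3
      · simp
      · simp [List.length_tail]
      · cases stack <;> simp_all
      · rfl
    rw [← hstack] at h
    by_cases hz : (if s[j] == "(" then (j : Int) :: stack
        else if s[j] == ")" then (if stack.length > 0 then stack.tail else stack)
        else stack).length = 0
    · rw [if_pos hz] at h
      rw [if_pos (by simpa using hz)]
      have hrest : List.drop (j+1) s = rest := by injection h
      have hlen : rest.length = s.length - (j+1) := by rw [← hrest]; simp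
      have : s.length - rest.length - 1 = j := by omega
      rw [this]
    · rw [if_neg hz] at h
      rw [if_neg (by simpa using hz)]
      have := ih (j+1) _ rest (by omega) h
      rw [Nat.cast_add, Nat.cast_one] at this
      exact this

theorem gfoFuel_some (s : List String) : ∀ (f : Nat) (j : Nat) (rest : List String),
    s.length - j < f → pvOperandPre (s.drop j) = some rest →
    gfoFuel s f ((j : Int) - 1) = some ((j : Int), ((s.length - rest.length - 1 : Nat) : Int)) := by
  intro f
  induction f with
  | zero => intro j rest hf h; exact absurd hf (by omega)
  | succ f ih =>
    intro j rest hf h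
    have hj : j < s.length := by
      by_contra hlt
      rw [List.drop_of_length_le (by omega)] at h
      simp [pvOperandPre] at h
    have hdrop : s.drop j = s[j] :: s.drop (j+1) := List.drop_eq_getElem_cons hj
    rw [hdrop] at h
    simp only [pvOperandPre] at h
    simp only [gfoFuel, sub_add_cancel, PySem.List.pyGet?_natCast, List.getElem?_eq_getElem hj]
    by_cases ht : s[j] = "~"
    · rw [if_pos ht] at h
      have hrec := ih (j+1) rest (by omega) h
      rw [show ((j+1 : Nat) : Int) - 1 = (j : Int) by push_cast; ring] at hrec
      rw [if_pos (by simp [ht])]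
      rw [hrec]
    · rw [if_neg ht] at h
      rw [if_neg (by simp [ht])]
      by_cases hp : s[j] = "("
      · rw [if_pos hp] at h
        rw [if_neg (by simp [hp])]
        have hg : pvGroup 0 (s.drop j) = some rest := by
          rw [hdrop]; simp [pvGroup, hp, h]
        have hscan := gfoScan_some s (s.length + 1) j [] rest (by omega) hg
        rw [hscan]
      · rw [if_neg hp] at h
        rw [if_pos (by simp [hp])]
        have hrest : List.drop (j+1) s = rest := by injection h
        have hlen : rest.length = s.length - (j+1) := by rw [← hrest]; simp
        have : s.length - rest.length - 1 = j := by omega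
        rw [this]

theorem mainLoopA_eq (s : List String) : ∀ (f : Nat) (j : Nat) (op : String),
    j ≤ s.length → pvRet op (s.drop j) = true → s.length - j < f →
    mainLoopA s f op ((j : Int) - 1) = refGo (s.drop j) op := by
  intro f
  induction f with
  | zero => intro j op hj hwf hf; exact absurd hf (by omega)
  | succ f ih =>
    intro j op hj hwf hf
    rw [pvRet_unfold] at hwf
    cases hop : pvOperandPre (s.drop j) with
    | none => rw [hop] at hwf; simp at hwf
    | some rest =>
      rw [hop] at hwf
      have hsuf := pvOperandPre_suffix hop
      have hdlen : (s.drop j).length = s.length - j := by simp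
      have hjlt : j < s.length := by
        by_contra hx
        rw [List.drop_of_length_le (by omega)] at hop
        simp [pvOperandPre] at hop
      have hrl : rest.length < s.length - j := by omega
      have hrdrop : s.drop (s.length - rest.length) = rest := by
        have h2 := hsuf.2
        rw [List.drop_drop] at h2
        rw [show s.length - rest.length = j + ((s.drop j).length - rest.length) by omega]
        exact h2
      rw [refGo_unfold, hop]
      simp only [mainLoopA]
      rw [if_pos (by omega : (j : Int) - 1 < (s.length : Int))]
      rw [gfoFuel_some s (s.length + 1) j rest (by omega) hop]
      dsimp only
      cases rest with
      | nil =>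
        have hrl0 : 0 < s.length - j := by simpa using hrl
        rw [if_pos (by simp only [List.length_nil]; omega)]
      | cons t r =>
        have hrl' : r.length + 1 < s.length - j := by simpa using hrl
        rw [if_neg (by simp only [List.length_cons]; omega)]
        rw [show ((s.length - (t :: r).length - 1 : Nat) : Int) + 1
              = ((s.length - (t :: r).length : Nat) : Int) by
            simp only [List.length_cons]; omega]
        set m := s.length - (t :: r).length with hmdef
        simp only [List.length_cons] at hmdef
        have hmlt : m < s.length := by omega
        have hget : PySem.List.pyGet? s (m : Int) = some t := by
          rw [PySem.List.pyGet?_natCast, ← List.head?_drop, hrdrop]; rfl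
        rw [hget]
        dsimp only
        have hdropm1 : s.drop (m+1) = r := by
          have h3 := congrArg List.tail hrdrop
          rw [List.tail_drop] at h3
          simpa using h3
        have hrec : ∀ op' : String, pvRet op' r = true →
            mainLoopA s f op' (m : Int) = refGo r op' := by
          intro op' hr
          rw [show ((m : Nat) : Int) = ((m+1 : Nat) : Int) - 1 by push_cast; ring]
          rw [ih (m+1) op' (by omega) (by rw [hdropm1]; exact hr) (by omega)]
          rw [hdropm1]
        by_cases hop0 : op = ""
        · rw [if_pos (by simp [hop0]), if_pos hop0]
          exact hrec t (by simpa [hop0] using hwf)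
        · rw [if_neg (by simp [hop0]), if_neg hop0]
          by_cases hteq : t = op
          · rw [if_neg (by simp [hteq]), if_neg (by simp [hteq])]
            exact hrec op (by simpa [hop0, hteq] using hwf)
          · rw [if_pos (by simp [hteq]), if_pos (by simp [hteq])]

-- ===== B-side bridge =====
theorem altParen_some (s : List String) : ∀ (f : Nat) (j : Nat) (d : Nat) (rest : List String),
    1 ≤ d → s.length - j < f → pvGroup d (s.drop j) = some rest →
    altParen s f (j : Int) (d : Int) = some ((s.length - rest.length : Nat) : Int) := by
  intro f
  induction f with
  | zero => intro j d rest hd hf h; exact absurd hf (by omega)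
  | succ f ih =>
    intro j d rest hd hf h
    have hj : j < s.length := by
      by_contra hlt
      rw [List.drop_of_length_le (by omega)] at h
      simp [pvGroup] at h
    have hdrop : s.drop j = s[j] :: s.drop (j+1) := List.drop_eq_getElem_cons hj
    rw [hdrop] at h
    simp only [pvGroup] at h
    simp only [altParen]
    rw [if_neg (by omega : ¬ (s.length : Int) ≤ (j : Int))]
    rw [PySem.List.pyGet?_natCast, List.getElem?_eq_getElem hj]
    dsimp only
    have hcast : (if s[j] == "(" then (d : Int) + 1 else if s[j] == ")" then (d : Int) - 1
        else (d : Int))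
        = ((if s[j] = "(" then d + 1 else if s[j] = ")" then d - 1 else d : Nat) : Int) := by
      simp only [beq_iff_eq]
      split_ifs <;> push_cast <;> omega
    rw [hcast]
    by_cases hz : (if s[j] = "(" then d + 1 else if s[j] = ")" then d - 1 else d) = 0
    · rw [if_pos hz] at h
      rw [if_pos (by simp [hz])]
      have hrest : List.drop (j+1) s = rest := by injection h
      have hlen : rest.length = s.length - (j+1) := by rw [← hrest]; simp
      have : s.length - rest.length = j + 1 := by omega
      rw [this]
      push_cast
      ring_nf
    · rw [if_neg hz] at h
      rw [if_neg (by simp only [beq_iff_eq, Int.natCast_eq_zero]; exact hz)]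
      have := ih (j+1) _ rest (by omega) (by omega) h
      rw [Nat.cast_add, Nat.cast_one] at this
      exact this

theorem altSkipNeg_some (s : List String) : ∀ (f : Nat) (j : Nat) (rest : List String),
    s.length - j < f → pvOperandPre (s.drop j) = some rest →
    ∃ (j1 : Nat) (t : String), altSkipNeg s f (j : Int) = some (j1 : Int) ∧
      s[j1]? = some t ∧ t ≠ "~" ∧ pvOperandPre (s.drop j1) = some rest := by
  intro f
  induction f with
  | zero => intro j rest hf h; exact absurd hf (by omega)
  | succ f ih =>
    intro j rest hf h
    have hj : j < s.length := by
      by_contra hlt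
      rw [List.drop_of_length_le (by omega)] at h
      simp [pvOperandPre] at h
    simp only [altSkipNeg]
    rw [PySem.List.pyGet?_natCast, List.getElem?_eq_getElem hj]
    dsimp only
    by_cases ht : s[j] = "~"
    · rw [if_pos (by simp [ht])]
      have h' : pvOperandPre (s.drop (j+1)) = some rest := by
        rw [List.drop_eq_getElem_cons hj] at h
        simp only [pvOperandPre] at h
        rwa [if_pos ht] at h
      obtain ⟨j1, t1, hs, hg, htn, hp⟩ := ih (j+1) rest (by omega) h'
      rw [Nat.cast_add, Nat.cast_one] at hs
      exact ⟨j1, t1, hs, hg, htn, hp⟩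
    · rw [if_neg (by simp [ht])]
      exact ⟨j, s[j], rfl, List.getElem?_eq_getElem hj, ht, h⟩

theorem altLoop_eq (s : List String) : ∀ (f : Nat) (j : Nat) (op : String),
    j ≤ s.length → pvRet op (s.drop j) = true → s.length - j < f →
    altLoop s f op (j : Int) = refGo (s.drop j) op := by
  intro f
  induction f with
  | zero => intro j op hj hwf hf; exact absurd hf (by omega)
  | succ f ih =>
    intro j op hj hwf hf
    rw [pvRet_unfold] at hwf
    cases hop : pvOperandPre (s.drop j) with
    | none => rw [hop] at hwf; simp at hwf
    | some rest =>
      rw [hop] at hwf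
      have hsuf := pvOperandPre_suffix hop
      have hdlen : (s.drop j).length = s.length - j := by simp
      have hjlt : j < s.length := by
        by_contra hx
        rw [List.drop_of_length_le (by omega)] at hop
        simp [pvOperandPre] at hop
      have hrl : rest.length < s.length - j := by omega
      have hrdrop : s.drop (s.length - rest.length) = rest := by
        have h2 := hsuf.2
        rw [List.drop_drop] at h2
        rw [show s.length - rest.length = j + ((s.drop j).length - rest.length) by omega]
        exact h2
      rw [refGo_unfold, hop]
      simp only [altLoop]
      obtain ⟨j1, t1, hskip, hget1, ht1, hop1⟩ :=
        altSkipNeg_some s (s.length + 1) j rest (by omega) hop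
      rw [hskip]
      dsimp only
      have hj1lt : j1 < s.length := (List.getElem?_eq_some_iff.mp hget1).1
      have ht1v : s[j1] = t1 := by
        have := List.getElem?_eq_getElem hj1lt
        rw [hget1] at this; injection this with h3; exact h3.symm
      have hdropj1 : s.drop j1 = t1 :: s.drop (j1+1) := by
        rw [List.drop_eq_getElem_cons hj1lt, ht1v]
      rw [hdropj1] at hop1
      simp only [pvOperandPre] at hop1
      rw [if_neg ht1] at hop1
      rw [PySem.List.pyGet?_natCast, hget1]
      dsimp only
      have hi2 : (if t1 == "(" then altParen s (s.length + 1) (j1 : Int) 0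
          else some ((j1 : Int) + 1)) = some ((s.length - rest.length : Nat) : Int) := by
        by_cases hp : t1 = "("
        · rw [if_pos (by simp [hp])]
          rw [if_pos hp] at hop1
          simp only [altParen]
          rw [if_neg (by omega : ¬ (s.length : Int) ≤ (j1 : Int))]
          rw [PySem.List.pyGet?_natCast, List.getElem?_eq_getElem hj1lt, ht1v]
          dsimp only
          rw [show (if (t1 == "(") = true then (0:Int) + 1 else if (t1 == ")") = true then 0 - 1 else 0) = 1 by
            simp [hp]]
          rw [if_neg (by norm_num)]
          have := altParen_some s (s.length) (j1+1) 1 rest (by omega) (by omega) hop1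
          rw [Nat.cast_add, Nat.cast_one] at this
          simpa using this
        · rw [if_neg (by simp [hp])]
          rw [if_neg hp] at hop1
          have hrest : s.drop (j1+1) = rest := by injection hop1
          have hlen : rest.length = s.length - (j1+1) := by rw [← hrest]; simp
          have : s.length - rest.length = j1 + 1 := by omega
          rw [this]
          push_cast
          ring_nf
      rw [hi2]
      dsimp only
      cases rest with
      | nil =>
        have hrl0 : 0 < s.length - j := by simpa using hrl
        rw [if_pos (by simp only [List.length_nil]; omega)]
      | cons t r =>
        have hrl' : r.length + 1 < s.length - j := by simpa using hrl
        rw [if_neg (by simp only [List.length_cons]; omega)]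
        set m := s.length - (t :: r).length with hmdef
        simp only [List.length_cons] at hmdef
        have hmlt : m < s.length := by omega
        have hget : PySem.List.pyGet? s (m : Int) = some t := by
          rw [PySem.List.pyGet?_natCast, ← List.head?_drop, hrdrop]; rfl
        rw [hget]
        dsimp only
        have hdropm1 : s.drop (m+1) = r := by
          have h3 := congrArg List.tail hrdrop
          rw [List.tail_drop] at h3
          simpa using h3
        have hrec : ∀ op' : String, pvRet op' r = true →
            altLoop s f op' ((m : Int) + 1) = refGo r op' := by
          intro op' hr
          rw [show (m : Int) + 1 = ((m+1 : Nat) : Int) by push_cast; ring]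
          rw [ih (m+1) op' (by omega) (by rw [hdropm1]; exact hr) (by omega)]
          rw [hdropm1]
        by_cases hop0 : op = ""
        · rw [if_pos (by simp [hop0]), if_pos hop0]
          exact hrec t (by simpa [hop0] using hwf)
        · rw [if_neg (by simp [hop0]), if_neg hop0]
          by_cases hteq : t = op
          · rw [if_neg (by simp [hteq]), if_neg (by simp [hteq])]
            exact hrec op (by simpa [hop0, hteq] using hwf)
          · rw [if_pos (by simp [hteq]), if_pos (by simp [hteq])]

-- ===== VERDICT (by name: the statement is the Claim_ definition above) =====
theorem get_main_operator_spec : Claim_equal_get_main_operator := by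
  intro s _hDom hPre
  unfold Spec_get_main_operator get_main_operator get_main_operator_alt
  have hA := mainLoopA_eq s (s.length + 2) 0 "" (by omega) (by simpa using hPre) (by omega)
  have hB := altLoop_eq s (s.length + 2) 0 "" (by omega) (by simpa using hPre) (by omega)
  simpa using hA.trans hB.symm
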